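-- pv_equiv track=rewrite | github.com/nsriniva/code-challenges | code_challenges/misc.py | checkBlanagrams2
-- ===== SOURCE A (Python) =====
-- from collections import defaultdict
--
-- def checkBlanagrams2(word1, word2):
--
--     if len(word1) != len(word2):
--         return False
--
--     ld = defaultdict(int)
--     for w in word1:
--         ld[w] += 1
--     for w in word2:
--         ld[w] -= 1
--
--     lcd = [0] * 3
--     for lc in ld.values():
--         i = lc + 1
--         # We only expect counts of -1(0), 0(1) or 1(2)
--         if i > 2 or i < 0:
--             return False
--         lcd[i] += 1
--
--     return lcd[0] == 1 and lcd[2] == 1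
-- ===== SOURCE B (Python) =====
-- def checkBlanagrams2(word1, word2):
--     s1, s2 = sorted(word1), sorted(word2)
--     i = j = extra1 = extra2 = 0
--     while i < len(s1) and j < len(s2):
--         if s1[i] == s2[j]:
--             i += 1
--             j += 1
--         elif s1[i] < s2[j]:
--             extra1 += 1
--             i += 1
--         else:
--             extra2 += 1
--             j += 1
--     extra1 += len(s1) - i
--     extra2 += len(s2) - j
--     return extra1 == 1 and extra2 == 1
-- ===== Notes on version B (the rewrite author's own statement) =====
-- stated objective: alternative
-- what changed: Replaces A's length guard, defaultdict count-difference histogram and 3-slot counting loop by sorting both words and running a two-pointer merge over the two sorted lists that counts the surplus characters of each side; the result is true iff each side has exactly one surplus (which forces equal lengths).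
import Mathlib
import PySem

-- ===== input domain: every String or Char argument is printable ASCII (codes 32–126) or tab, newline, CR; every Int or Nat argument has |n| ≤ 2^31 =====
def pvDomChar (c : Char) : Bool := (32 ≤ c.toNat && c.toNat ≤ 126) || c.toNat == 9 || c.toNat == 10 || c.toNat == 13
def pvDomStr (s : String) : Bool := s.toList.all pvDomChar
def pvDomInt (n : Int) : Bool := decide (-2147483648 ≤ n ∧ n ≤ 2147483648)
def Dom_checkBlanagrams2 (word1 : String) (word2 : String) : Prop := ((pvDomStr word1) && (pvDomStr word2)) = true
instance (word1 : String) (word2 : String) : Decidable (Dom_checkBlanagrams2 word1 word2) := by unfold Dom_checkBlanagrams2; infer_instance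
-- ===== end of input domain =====

-- B replaces A's length guard, defaultdict count-difference histogram and 3-slot counting loop by
-- sorting both words and a two-pointer merge counting each side's surplus characters (alternative; not faster).


-- ===== PORT A =====
-- the 'for lc in ld.values()' loop with its early 'return False'; lcd is the 3-slot list
def pvLoopA : List Int → List Int → Option (List Int)
  | [], lcd => some lcd
  | lc :: rest, lcd =>
    let i := lc + 1
    if i > 2 ∨ i < 0 then none
    else pvLoopA rest (PySem.List.pySetD lcd i (PySem.List.pyGetD lcd i 0 + 1))

def checkBlanagrams2 (word1 : String) (word2 : String) : Bool :=
  if word1.toList.length ≠ word2.toList.length then false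
  else
    match pvLoopA (word2.toList.foldl (fun d w => d.modify w 0 (· - 1))
      (word1.toList.foldl (fun d w => d.modify w 0 (· + 1)) PySem.Dict.empty)).values
      (List.replicate 3 0) with
    | none => false
    | some lcd => PySem.List.pyGetD lcd 0 0 == 1 && PySem.List.pyGetD lcd 2 0 == 1

-- ===== PORT B =====
-- the two-pointer while loop over the two sorted lists: returns the final (extra1, extra2),
-- the tail lengths being added when one list runs out
def pvTwoPtr : List Char → List Char → Int × Int
  | [], l2 => (0, (l2.length : Int))
  | a :: t1, [] => (((a :: t1).length : Int), 0)
  | a :: t1, b :: t2 =>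
    if a == b then pvTwoPtr t1 t2
    else if a < b then
      let r := pvTwoPtr t1 (b :: t2)
      (r.1 + 1, r.2)
    else
      let r := pvTwoPtr (a :: t1) t2
      (r.1, r.2 + 1)
termination_by l1 l2 => l1.length + l2.length
decreasing_by all_goals simp <;> omega

def checkBlanagrams2_alt (word1 : String) (word2 : String) : Bool :=
  let s1 := PySem.List.sorted word1.toList (fun c => c) false
  let s2 := PySem.List.sorted word2.toList (fun c => c) false
  let r := pvTwoPtr s1 s2
  r.1 == 1 && r.2 == 1

-- ===== PRECONDITION & SPEC =====
def Spec_checkBlanagrams2 (word1 : String) (word2 : String) (out : Bool) : Prop := out = checkBlanagrams2_alt word1 word2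
instance (word1 : String) (word2 : String) (out : Bool) : Decidable (Spec_checkBlanagrams2 word1 word2 out) := by unfold Spec_checkBlanagrams2; infer_instance

-- ===== CLAIM (what is proved, stated in full; the proofs are below) =====
def Claim_equal_checkBlanagrams2 : Prop := ∀ (word1 : String) (word2 : String), Dom_checkBlanagrams2 word1 word2 → Spec_checkBlanagrams2 word1 word2 (checkBlanagrams2 word1 word2)

-- ===== LEMMAS AND PROOFS =====

-- the per-character count difference and the list of distinct characters of both words (A's dict-key order)
def pvF (w1 w2 : String) (k : Char) : Int := (w1.toList.count k : Int) - w2.toList.count k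
def pvK (w1 w2 : String) : List Char := PySem.Set.update (PySem.Set.ofList w1.toList) w2.toList

-- the common characterisation both programs are reduced to
def pvCond (w1 w2 : String) : Prop :=
  (∀ x ∈ (pvK w1 w2).map (pvF w1 w2), -1 ≤ x ∧ x ≤ 1) ∧
  ((pvK w1 w2).map (pvF w1 w2)).count 1 = 1 ∧
  ((pvK w1 w2).map (pvF w1 w2)).count (-1) = 1

-- sum of the positive entries of a list
def pvPosSum (vals : List Int) : Int := (vals.filter (fun x => 0 < x)).sum

theorem pvPosSum_cons (x : Int) (rest : List Int) :
    pvPosSum (x :: rest) = (if 0 < x then x else 0) + pvPosSum rest := by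
  simp only [pvPosSum, List.filter_cons]
  split <;> simp_all

theorem pvPosSum_nonneg (vals : List Int) : 0 ≤ pvPosSum vals := by
  induction vals with
  | nil => simp [pvPosSum]
  | cons x rest ih => rw [pvPosSum_cons]; split <;> omega

theorem pvPosSum_eq_zero_iff (vals : List Int) : pvPosSum vals = 0 ↔ ∀ x ∈ vals, x ≤ 0 := by
  induction vals with
  | nil => simp [pvPosSum]
  | cons x rest ih =>
    have h0 := pvPosSum_nonneg rest
    rw [pvPosSum_cons]
    constructor
    · intro hsum y hy
      rcases List.mem_cons.1 hy with rfl | hy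
      · by_cases hx : 0 < y <;> simp [hx] at hsum <;> omega
      · have : pvPosSum rest = 0 := by split at hsum <;> omega
        exact ih.1 this y hy
    · intro hall
      have hx : ¬ 0 < x := by have := hall x (by simp); omega
      rw [if_neg hx]
      have := ih.2 (fun y hy => hall y (List.mem_cons_of_mem _ hy))
      omega

theorem pvPosSum_eq_one_iff (vals : List Int) :
    pvPosSum vals = 1 ↔ vals.count 1 = 1 ∧ ∀ x ∈ vals, x ≤ 1 := by
  induction vals with
  | nil => simp [pvPosSum]
  | cons x rest ih =>
    have h0 := pvPosSum_nonneg rest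
    have hz := pvPosSum_eq_zero_iff rest
    rw [pvPosSum_cons, List.count_cons]
    constructor
    · intro hsum
      by_cases hx : 0 < x
      · rw [if_pos hx] at hsum
        have hx1 : x = 1 := by omega
        have hr0 : pvPosSum rest = 0 := by omega
        have hall := hz.1 hr0
        have hc : rest.count 1 = 0 := List.count_eq_zero.2 (fun hm => by have := hall 1 hm; omega)
        subst hx1
        refine ⟨by simp [hc], ?_⟩
        intro y hy
        rcases List.mem_cons.1 hy with rfl | hy
        · omega
        · have := hall y hy; omega
      · rw [if_neg hx] at hsum
        simp only [zero_add] at hsum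
        obtain ⟨hc, hall⟩ := ih.1 hsum
        have hxne : ((x:Int) == 1) = false := by simp; omega
        refine ⟨by simp [hc, hxne], ?_⟩
        intro y hy
        rcases List.mem_cons.1 hy with rfl | hy
        · omega
        · exact hall y hy
    · rintro ⟨hc, hall⟩
      by_cases hx1 : x = 1
      · subst hx1
        simp only [if_pos (by omega : (0:Int) < 1)]
        simp only [beq_self_eq_true, if_pos] at hc
        have hc0 : rest.count 1 = 0 := by omega
        have hall0 : ∀ y ∈ rest, y ≤ 0 := by
          intro y hy
          have h1 := hall y (List.mem_cons_of_mem _ hy)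
          have : y ≠ 1 := fun h => by subst h; rw [List.count_eq_zero] at hc0; exact hc0 hy
          omega
        have := hz.2 hall0
        omega
      · have hxne : ((x:Int) == 1) = false := by simp; omega
        rw [hxne, if_neg (by simp)] at hc
        simp only [Nat.add_zero] at hc
        have hx0 : ¬ 0 < x := by
          have := hall x (by simp); omega
        rw [if_neg hx0]
        have := ih.2 ⟨hc, fun y hy => hall y (List.mem_cons_of_mem _ hy)⟩
        omega

-- getD after the subtracting fold of port A
theorem pv_getD_foldl_modify_sub_one (l : List Char) (d : PySem.Dict Char Int) (v : Char) :
    (l.foldl (fun d x => d.modify x 0 (· - 1)) d).getD v 0 = d.getD v 0 - l.count v := by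
  induction l generalizing d with
  | nil => simp
  | cons x rest ih =>
    simp only [List.foldl_cons, ih, PySem.Dict.getD_modify, List.count_cons]
    by_cases hvx : v = x
    · subst hvx; simp; ring
    · have : (x == v) = false := by simp [Ne.symm hvx]
      simp [hvx, this]

-- characterisation of A's counting loop
theorem pvLoopA_eq (vals : List Int) (a b c : Int) :
    pvLoopA vals [a, b, c] =
      if vals.all (fun x => decide (-1 ≤ x) && decide (x ≤ 1)) then
        some [a + vals.count (-1), b + vals.count 0, c + vals.count 1]
      else none := by
  induction vals generalizing a b c with
  | nil => simp [pvLoopA]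
  | cons x rest ih =>
    simp only [pvLoopA, List.all_cons, List.count_cons]
    by_cases hx : -1 ≤ x ∧ x ≤ 1
    · have hguard : ¬ (x + 1 > 2 ∨ x + 1 < 0) := by omega
      rw [if_neg hguard]
      have hx3 : x = -1 ∨ x = 0 ∨ x = 1 := by omega
      rcases hx3 with rfl | rfl | rfl <;>
        simp [PySem.List.pySetD, PySem.List.pySet?, PySem.List.pyGetD, PySem.List.pyGet?,
          PySem.List.pyIdx?, ih] <;> split <;> simp <;> ring
    · have hguard : (x + 1 > 2 ∨ x + 1 < 0) := by omega
      rw [if_pos hguard]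
      have : (decide (-1 ≤ x) && decide (x ≤ 1)) = false := by
        simp; omega
      simp [this]

theorem pv_sum_indicator (K : List Char) (c : Char) :
    (K.map (fun k => if k = c then (1:Int) else 0)).sum = (K.countP (fun k => k = c) : Int) := by
  induction K with
  | nil => simp
  | cons a K' ihK =>
    simp only [List.map_cons, List.sum_cons, List.countP_cons, ihK]
    by_cases hac : a = c
    · simp [hac]; ring
    · simp [hac]

-- Σ_{k ∈ K} count L k = |L| for K nodup covering L's elements
theorem pv_sum_counts (K L : List Char) (hnd : K.Nodup) (hsub : ∀ c ∈ L, c ∈ K) :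
    (K.map (fun k => (L.count k : Int))).sum = L.length := by
  induction L with
  | nil => simp
  | cons c L' ih =>
    have hc : c ∈ K := hsub c (by simp)
    have ih' := ih (fun x hx => hsub x (List.mem_cons_of_mem _ hx))
    have hsplit : (K.map (fun k => ((c :: L').count k : Int))).sum
        = (K.map (fun k => (L'.count k : Int))).sum
          + (K.map (fun k => if k = c then (1:Int) else 0)).sum := by
      rw [← List.sum_map_add]
      congr 1
      apply List.map_congr_left
      intro k hk
      simp only [List.count_cons]
      by_cases hkc : k = c
      · subst hkc; simp
      · have : (c == k) = false := by simp [Ne.symm hkc]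
        simp [this, hkc]
    have hind : (K.map (fun k => if k = c then (1:Int) else 0)).sum = 1 := by
      rw [pv_sum_indicator]
      have : K.countP (fun k => k = c) = K.count c := by
        apply List.countP_congr
        intro a _
        simp
      rw [this, List.count_eq_one_of_mem hnd hc]
      simp
    rw [hsplit, ih', hind]
    simp only [List.length_cons]; push_cast; ring

theorem pv_sum_of_pm (vals : List Int) (h : ∀ x ∈ vals, -1 ≤ x ∧ x ≤ 1) :
    vals.sum = (vals.count 1 : Int) - vals.count (-1) := by
  induction vals with
  | nil => simp
  | cons x rest ih =>
    have hx := h x (by simp)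
    have ihr := ih (fun y hy => h y (List.mem_cons_of_mem _ hy))
    simp only [List.sum_cons, List.count_cons, ihr]
    have hx3 : x = -1 ∨ x = 0 ∨ x = 1 := by omega
    rcases hx3 with rfl | rfl | rfl <;> simp <;> ring_nf

theorem pv_sum_map_sub (K : List Char) (f g : Char → Int) :
    (K.map (fun k => f k - g k)).sum = (K.map f).sum - (K.map g).sum := by
  induction K with
  | nil => simp
  | cons a K' ih => simp only [List.map_cons, List.sum_cons, ih]; ring

theorem pv_nodup_K (w1 w2 : String) : (pvK w1 w2).Nodup :=
  PySem.Set.nodup_update _ _ (PySem.Set.nodup_ofList _)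

theorem pv_count_neg (L : List Int) : (L.map (fun x => -x)).count 1 = L.count (-1) := by
  simp only [List.count, List.countP_map]
  apply List.countP_congr
  intro x _
  simp only [Function.comp]
  constructor <;> intro h <;> [skip; skip] <;> simp_all <;> omega

-- ===== B-side lemmas: the two-pointer merge computes the multiset-difference cardinalities =====

theorem pv_cons_sub_of_not_mem (a : Char) (s t : Multiset Char) (h : a ∉ t) :
    (a ::ₘ s) - t = a ::ₘ (s - t) := by
  ext x
  simp only [Multiset.count_sub, Multiset.count_cons]
  by_cases hxa : x = a
  · subst hxa
    have : Multiset.count x t = 0 := Multiset.count_eq_zero.2 h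
    simp [this]
  · simp [hxa]

theorem pvTwoPtr_eq (l1 l2 : List Char)
    (h1 : l1.Pairwise (· ≤ ·)) (h2 : l2.Pairwise (· ≤ ·)) :
    pvTwoPtr l1 l2 = ((Multiset.card ((l1 : Multiset Char) - (l2 : Multiset Char)) : Int),
                      (Multiset.card ((l2 : Multiset Char) - (l1 : Multiset Char)) : Int)) := by
  induction l1, l2 using pvTwoPtr.induct with
  | case1 l2 =>
    simp only [pvTwoPtr, Multiset.coe_nil, Multiset.zero_sub, Multiset.card_zero,
      Multiset.sub_zero, Multiset.coe_card, Nat.cast_zero]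
  | case2 a t1 =>
    simp only [pvTwoPtr, Multiset.coe_nil, Multiset.zero_sub, Multiset.card_zero,
      Multiset.sub_zero, Multiset.coe_card, Nat.cast_zero]
  | case3 a t1 b t2 hab ih =>
    have hab' : a = b := by simpa using hab
    subst hab'
    rw [pvTwoPtr]
    simp only [beq_self_eq_true, if_true]
    rw [ih h1.of_cons h2.of_cons]
    have key : ∀ (s t : List Char),
        ((a :: s : List Char) : Multiset Char) - ((a :: t : List Char) : Multiset Char)
          = (s : Multiset Char) - (t : Multiset Char) := by
      intro s t
      rw [← Multiset.cons_coe, ← Multiset.cons_coe, Multiset.sub_cons,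
        Multiset.erase_cons_head]
    rw [key t1 t2, key t2 t1]
  | case4 a t1 b t2 hab hlt ih =>
    have hnm2 : a ∉ (((b :: t2 : List Char)) : Multiset Char) := by
      simp only [Multiset.mem_coe, List.mem_cons]
      rintro (rfl | hmem)
      · exact absurd hlt (lt_irrefl a)
      · have := (List.pairwise_cons.1 h2).1 a hmem
        exact absurd (lt_of_lt_of_le hlt this) (lt_irrefl a)
    rw [pvTwoPtr]
    rw [if_neg (by simpa using hab), if_pos hlt]
    rw [ih h1.of_cons h2]
    have e1 : ((a :: t1 : List Char) : Multiset Char) - ((b :: t2 : List Char) : Multiset Char)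
        = a ::ₘ (((t1 : List Char) : Multiset Char) - ((b :: t2 : List Char) : Multiset Char)) := by
      rw [← Multiset.cons_coe]
      exact pv_cons_sub_of_not_mem a _ _ hnm2
    have e2 : ((b :: t2 : List Char) : Multiset Char) - ((a :: t1 : List Char) : Multiset Char)
        = ((b :: t2 : List Char) : Multiset Char) - ((t1 : List Char) : Multiset Char) := by
      rw [← Multiset.cons_coe (l := t1), Multiset.sub_cons,
        Multiset.erase_of_notMem hnm2]
    rw [e1, e2]
    simp
  | case5 a t1 b t2 hab hnlt ih =>
    have hne : a ≠ b := by simpa using hab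
    have hlt : b < a := lt_of_le_of_ne (le_of_not_gt hnlt) (Ne.symm hne)
    have hnm1 : b ∉ (((a :: t1 : List Char)) : Multiset Char) := by
      simp only [Multiset.mem_coe, List.mem_cons]
      rintro (rfl | hmem)
      · exact absurd hlt (lt_irrefl b)
      · have := (List.pairwise_cons.1 h1).1 b hmem
        exact absurd (lt_of_lt_of_le hlt this) (lt_irrefl b)
    rw [pvTwoPtr]
    rw [if_neg (by simpa using hab), if_neg hnlt]
    rw [ih h1 h2.of_cons]
    have e1 : ((a :: t1 : List Char) : Multiset Char) - ((b :: t2 : List Char) : Multiset Char)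
        = ((a :: t1 : List Char) : Multiset Char) - ((t2 : List Char) : Multiset Char) := by
      rw [← Multiset.cons_coe (l := t2), Multiset.sub_cons,
        Multiset.erase_of_notMem hnm1]
    have e2 : ((b :: t2 : List Char) : Multiset Char) - ((a :: t1 : List Char) : Multiset Char)
        = b ::ₘ (((t2 : List Char) : Multiset Char) - ((a :: t1 : List Char) : Multiset Char)) := by
      rw [← Multiset.cons_coe]
      exact pv_cons_sub_of_not_mem b _ _ hnm1
    rw [e1, e2]
    simp

-- card of a positive multiset difference as a positive-part sum over a covering nodup key list
theorem pv_card_sub (K l1 l2 : List Char) (hnd : K.Nodup) (hsub : ∀ c ∈ l1, c ∈ K) :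
    (Multiset.card ((l1 : Multiset Char) - (l2 : Multiset Char)) : Int)
      = pvPosSum (K.map (fun k => (l1.count k : Int) - l2.count k)) := by
  have hmax : ∀ (K' : List Char), pvPosSum (K'.map (fun k => (l1.count k : Int) - l2.count k))
      = (K'.map (fun k => ((l1.count k - l2.count k : Nat) : Int))).sum := by
    intro K'
    induction K' with
    | nil => simp [pvPosSum]
    | cons a K'' ihK =>
      simp only [List.map_cons, List.sum_cons, pvPosSum_cons, ihK]
      congr 1
      split <;> omega
  rw [hmax]
  have hcount : ∀ k, ((l1 : Multiset Char) - (l2 : Multiset Char)).count k = l1.count k - l2.count k := by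
    intro k
    rw [Multiset.count_sub]
    simp
  have hcard : Multiset.card ((l1 : Multiset Char) - (l2 : Multiset Char))
      = K.toFinset.sum (fun k => ((l1 : Multiset Char) - (l2 : Multiset Char)).count k) := by
    rw [← Multiset.toFinset_sum_count_eq]
    apply Finset.sum_subset
    · intro x hx
      rw [Multiset.mem_toFinset] at hx
      have hx1 : x ∈ (l1 : Multiset Char) :=
        Multiset.mem_of_le (Multiset.sub_le_self _ _) hx
      rw [List.mem_toFinset]
      exact hsub x (Multiset.mem_coe.1 hx1)
    · intro x _ hnx
      rw [Multiset.mem_toFinset] at hnx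
      exact Multiset.count_eq_zero.2 hnx
  rw [hcard]
  rw [← List.sum_toFinset _ hnd]
  push_cast
  apply Finset.sum_congr rfl
  intro k _
  rw [hcount k]

-- B returns true exactly on pvCond
theorem pv_alt_iff (w1 w2 : String) : checkBlanagrams2_alt w1 w2 = true ↔ pvCond w1 w2 := by
  have hK := pv_nodup_K w1 w2
  have hs1 : (PySem.List.sorted w1.toList (fun c => c) false).Pairwise (· ≤ ·) :=
    PySem.List.sorted_pairwise _ _
  have hs2 : (PySem.List.sorted w2.toList (fun c => c) false).Pairwise (· ≤ ·) :=
    PySem.List.sorted_pairwise _ _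
  have hm1 : ((PySem.List.sorted w1.toList (fun c => c) false : List Char) : Multiset Char)
      = (w1.toList : Multiset Char) := Multiset.coe_eq_coe.2 (PySem.List.sorted_perm _ _ _)
  have hm2 : ((PySem.List.sorted w2.toList (fun c => c) false : List Char) : Multiset Char)
      = (w2.toList : Multiset Char) := Multiset.coe_eq_coe.2 (PySem.List.sorted_perm _ _ _)
  have hsub1 : ∀ c ∈ w1.toList, c ∈ pvK w1 w2 := fun c hc =>
    (PySem.Set.mem_update _ _ _).2 (Or.inl ((PySem.Set.mem_ofList _ _).2 hc))
  have hsub2 : ∀ c ∈ w2.toList, c ∈ pvK w1 w2 := fun c hc =>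
    (PySem.Set.mem_update _ _ _).2 (Or.inr hc)
  have hpos : (Multiset.card ((w1.toList : Multiset Char) - (w2.toList : Multiset Char)) : Int)
      = pvPosSum ((pvK w1 w2).map (pvF w1 w2)) := by
    rw [pv_card_sub (pvK w1 w2) _ _ hK hsub1]
    rfl
  have hneg : (Multiset.card ((w2.toList : Multiset Char) - (w1.toList : Multiset Char)) : Int)
      = pvPosSum (((pvK w1 w2).map (pvF w1 w2)).map (fun x => -x)) := by
    rw [pv_card_sub (pvK w1 w2) _ _ hK hsub2]
    congr 1
    rw [List.map_map]
    apply List.map_congr_left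
    intro k _
    simp [pvF]
  show ((pvTwoPtr _ _).1 == 1 && (pvTwoPtr _ _).2 == 1) = true ↔ _
  rw [pvTwoPtr_eq _ _ hs1 hs2, hm1, hm2]
  rw [Bool.and_eq_true, beq_iff_eq, beq_iff_eq]
  simp only [hpos, hneg]
  rw [pvPosSum_eq_one_iff, pvPosSum_eq_one_iff, pv_count_neg]
  unfold pvCond
  constructor
  · rintro ⟨⟨hc1, hb1⟩, hcm1, hb2⟩
    refine ⟨?_, hc1, hcm1⟩
    intro x hx
    have := hb1 x hx
    have := hb2 (-x) (List.mem_map_of_mem hx)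
    omega
  · rintro ⟨hb, hc1, hcm1⟩
    refine ⟨⟨hc1, fun x hx => (hb x hx).2⟩, hcm1, ?_⟩
    intro y hy
    obtain ⟨x, hx, rfl⟩ := List.mem_map.1 hy
    have := (hb x hx).1
    omega

-- A returns true exactly on (equal lengths ∧ pvCond)
theorem pv_a_iff (w1 w2 : String) :
    checkBlanagrams2 w1 w2 = true ↔ (w1.toList.length = w2.toList.length ∧ pvCond w1 w2) := by
  unfold checkBlanagrams2
  by_cases hlen : w1.toList.length = w2.toList.length
  · rw [if_neg (by omega)]
    have hvals : (w2.toList.foldl (fun d w => d.modify w 0 (· - 1))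
        (w1.toList.foldl (fun d w => d.modify w 0 (· + 1)) (PySem.Dict.empty : PySem.Dict Char Int))).values
        = (pvK w1 w2).map (pvF w1 w2) := by
      have hkeys : (w2.toList.foldl (fun d w => d.modify w 0 (· - 1))
          (w1.toList.foldl (fun d w => d.modify w 0 (· + 1)) (PySem.Dict.empty : PySem.Dict Char Int))).keys
          = pvK w1 w2 := by
        rw [PySem.Dict.keys_foldl_modify, PySem.Dict.keys_foldl_modify,
          PySem.Dict.keys_empty, PySem.Set.update_nil_left]
        rfl
      have hnd : (w2.toList.foldl (fun d w => d.modify w 0 (· - 1))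
          (w1.toList.foldl (fun d w => d.modify w 0 (· + 1)) (PySem.Dict.empty : PySem.Dict Char Int))).keys.Nodup := by
        rw [hkeys]; exact pv_nodup_K w1 w2
      rw [PySem.Dict.values_eq_map_keys _ hnd 0, hkeys]
      apply List.map_congr_left
      intro k _
      rw [pv_getD_foldl_modify_sub_one, PySem.Dict.getD_foldl_modify_add_one,
        PySem.Dict.getD_empty]
      simp [pvF]
    rw [hvals]
    have hrep : (List.replicate 3 (0:Int)) = [0, 0, 0] := rfl
    rw [hrep, pvLoopA_eq]
    by_cases hall : ((pvK w1 w2).map (pvF w1 w2)).all (fun x => decide (-1 ≤ x) && decide (x ≤ 1))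
    · rw [if_pos hall]
      have hbounds : ∀ x ∈ (pvK w1 w2).map (pvF w1 w2), -1 ≤ x ∧ x ≤ 1 := by
        intro x hx
        have := List.all_eq_true.1 hall x hx
        simp at this; omega
      simp only [PySem.List.pyGetD, PySem.List.pyGet?, PySem.List.pyIdx?]
      simp only [zero_add]
      unfold pvCond
      constructor
      · intro h
        simp at h
        exact ⟨hlen, hbounds, by omega, by omega⟩
      · rintro ⟨_, _, hc1, hcm1⟩
        simp [hc1, hcm1]
    · rw [if_neg hall]
      simp only [Bool.false_eq_true, false_iff]
      rintro ⟨_, hcond⟩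
      unfold pvCond at hcond
      obtain ⟨hb, -, -⟩ := hcond
      apply hall
      rw [List.all_eq_true]
      intro x hx
      have := hb x hx
      simp only [Bool.and_eq_true, decide_eq_true_eq]
      omega
  · rw [if_pos (by omega)]
    simp only [Bool.false_eq_true, false_iff]
    intro h; exact absurd h.1 hlen

-- pvCond forces equal lengths
theorem pv_cond_len (w1 w2 : String) (h : pvCond w1 w2) :
    w1.toList.length = w2.toList.length := by
  obtain ⟨hb, hc1, hcm1⟩ := h
  have hK := pv_nodup_K w1 w2
  have hsum := pv_sum_of_pm _ hb
  rw [hc1, hcm1] at hsum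
  have hmapeq : (pvK w1 w2).map (pvF w1 w2)
      = (pvK w1 w2).map (fun k => (w1.toList.count k : Int) - w2.toList.count k) :=
    List.map_congr_left (fun k _ => rfl)
  have hsplit : ((pvK w1 w2).map (pvF w1 w2)).sum
      = ((pvK w1 w2).map (fun k => (w1.toList.count k : Int))).sum
        - ((pvK w1 w2).map (fun k => (w2.toList.count k : Int))).sum := by
    rw [hmapeq, pv_sum_map_sub]
  have h1 : ((pvK w1 w2).map (fun k => (w1.toList.count k : Int))).sum = w1.toList.length :=
    pv_sum_counts _ _ hK (fun c hc => (PySem.Set.mem_update _ _ _).2 (Or.inl ((PySem.Set.mem_ofList _ _).2 hc)))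
  have h2 : ((pvK w1 w2).map (fun k => (w2.toList.count k : Int))).sum = w2.toList.length :=
    pv_sum_counts _ _ hK (fun c hc => (PySem.Set.mem_update _ _ _).2 (Or.inr hc))
  rw [hsplit, h1, h2] at hsum
  omega

-- ===== VERDICT (by name: the statement is the Claim_ definition above) =====
theorem checkBlanagrams2_spec : Claim_equal_checkBlanagrams2 := by
  intro w1 w2 _
  unfold Spec_checkBlanagrams2
  rw [Bool.eq_iff_iff, pv_a_iff, pv_alt_iff]
  constructor
  · rintro ⟨_, h⟩; exact h
  · intro h; exact ⟨pv_cond_len w1 w2 h, h⟩
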